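-- pv_equiv track=rewrite | github.com/andrewgolman/Stability_In_Multi-Jurisdictional_Structures | code/partition.py | formation_size
-- ===== SOURCE A (Python) =====
-- def formation_size(classes, median):
--     left = 0
--     right = 0
--     mid = 0
--     for cl in classes:
--         if cl[1] < median:
--             left += cl[0]
--         elif cl[1] == median:
--             mid += cl[0]
--         else:
--             right += cl[0]
--     if left > right:
--         left, right = right, left
--     if left + mid < right:
--         right = left + mid
--
--     return left + mid + right
-- ===== SOURCE B (Python) =====
-- def _bisect(values, x, left):
--     # hand-written binary search (bisect_left when left, else bisect_right)
--     lo, hi = 0, len(values)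
--     while lo < hi:
--         m = (lo + hi) // 2
--         if values[m] < x or (not left and values[m] == x):
--             lo = m + 1
--         else:
--             hi = m
--     return lo
--
--
-- def formation_size(classes, median):
--     svals = sorted(classes, key=lambda cl: cl[1])
--     values = [cl[1] for cl in svals]
--     prefix = [0]
--     for cl in svals:
--         prefix.append(prefix[-1] + cl[0])
--     total = prefix[-1]
--     lo = _bisect(values, median, True)
--     hi = _bisect(values, median, False)
--     left = prefix[lo]
--     mid = prefix[hi] - prefix[lo]
--     right = total - prefix[hi]
--     return min(total, 2 * (min(left, right) + mid))
-- ===== Notes on version B (the rewrite author's own statement) =====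
-- stated objective: alternative
-- what changed: B sorts the classes by value, builds a prefix-sum array of weights, locates the <median and <=median split points with a hand-written binary search, reads the three bucket sums off the prefix array and returns the closed form min(total, 2*(min(left,right)+mid)), replacing A's single accumulating loop with swap-and-mutate branching.
import Mathlib
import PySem

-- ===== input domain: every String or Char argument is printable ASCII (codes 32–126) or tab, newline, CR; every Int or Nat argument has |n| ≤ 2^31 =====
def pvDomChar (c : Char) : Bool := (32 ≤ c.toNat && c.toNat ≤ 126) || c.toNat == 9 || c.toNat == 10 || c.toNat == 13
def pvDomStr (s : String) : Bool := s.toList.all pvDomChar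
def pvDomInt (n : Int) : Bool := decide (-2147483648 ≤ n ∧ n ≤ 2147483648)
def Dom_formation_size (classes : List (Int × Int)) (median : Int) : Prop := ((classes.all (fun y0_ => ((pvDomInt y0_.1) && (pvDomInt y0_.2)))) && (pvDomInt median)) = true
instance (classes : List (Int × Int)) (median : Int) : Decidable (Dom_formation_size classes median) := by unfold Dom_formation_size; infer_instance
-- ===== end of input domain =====

-- B: sort by value + prefix sums + binary-search split points + closed-form min,
-- instead of A's single accumulating loop with swap/mutate branching (objective: alternative).


-- ===== PORT A =====
def formation_size (classes : List (Int × Int)) (median : Int) : Int :=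
  let s := classes.foldl (fun (st : Int × Int × Int) cl =>
      let (left, mid, right) := st
      if cl.2 < median then (left + cl.1, mid, right)
      else if cl.2 = median then (left, mid + cl.1, right)
      else (left, mid, right + cl.1)) (0, 0, 0)
  let (left, mid, right) := s
  let (left, right) := if left > right then (right, left) else (left, right)
  let right := if left + mid < right then left + mid else right
  left + mid + right

-- ===== PORT B =====
-- Port of Source B's hand-written `_bisect` while-loop (bisect_left when left = true,
-- bisect_right otherwise).  Source B only reads values[m] with m in range (lo < hi ≤ len),
-- so `getD … 0` is exact there.
-- structural recursion on the fuel hi - lo (each iteration shrinks hi - lo, so it never runs out)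
def pvBisectGo (values : List Int) (x : Int) (left : Bool) : Nat → Nat → Nat → Nat
  | 0, lo, _ => lo
  | fuel + 1, lo, hi =>
    if lo < hi then
      let m := (lo + hi) / 2
      if (values.getD m 0 < x) || (!left && values.getD m 0 == x) then
        pvBisectGo values x left fuel (m + 1) hi
      else
        pvBisectGo values x left fuel lo m
    else lo

def pvBisect (values : List Int) (x : Int) (left : Bool) (lo hi : Nat) : Nat :=
  pvBisectGo values x left (hi - lo) lo hi

def formation_size_alt (classes : List (Int × Int)) (median : Int) : Int :=
  let svals := PySem.List.sorted classes (fun cl => cl.2) false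
  let values := svals.map (fun cl => cl.2)
  -- Python's prefix.append(prefix[-1] + cl[0]); prefix is never empty, so getLastD 0 is exact
  let pre := svals.foldl (fun pre cl => pre ++ [pre.getLastD 0 + cl.1]) [(0 : Int)]
  let total := pre.getLastD 0
  let lo := pvBisect values median true 0 values.length
  let hi := pvBisect values median false 0 values.length
  -- prefix[lo], prefix[hi] are always in range (lo, hi ≤ len svals < len prefix)
  let left := pre.getD lo 0
  let mid := pre.getD hi 0 - pre.getD lo 0
  let right := total - pre.getD hi 0
  min total (2 * (min left right + mid))

-- ===== PRECONDITION & SPEC =====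
def Spec_formation_size (classes : List (Int × Int)) (median : Int) (out : Int) : Prop := out = formation_size_alt classes median
instance (classes : List (Int × Int)) (median : Int) (out : Int) : Decidable (Spec_formation_size classes median out) := by unfold Spec_formation_size; infer_instance

-- ===== CLAIM =====
def Claim_equal_formation_size : Prop := ∀ (classes : List (Int × Int)) (median : Int), Dom_formation_size classes median → Spec_formation_size classes median (formation_size classes median)

-- ===== LEMMAS AND PROOFS =====

/-- A's fold accumulates exactly the three filtered sums, from any start state. -/
lemma fold_eq_sums (classes : List (Int × Int)) (median : Int) (l m r : Int) :
    classes.foldl (fun (st : Int × Int × Int) cl =>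
      let (left, mid, right) := st
      if cl.2 < median then (left + cl.1, mid, right)
      else if cl.2 = median then (left, mid + cl.1, right)
      else (left, mid, right + cl.1)) (l, m, r)
    = (l + ((classes.filter (fun cl => cl.2 < median)).map Prod.fst).sum,
       m + ((classes.filter (fun cl => cl.2 = median)).map Prod.fst).sum,
       r + ((classes.filter (fun cl => median < cl.2)).map Prod.fst).sum) := by
  induction classes generalizing l m r with
  | nil => simp
  | cons hd tl ih =>
    by_cases h1 : hd.2 < median
    · have h2 : ¬ hd.2 = median := by omega
      have h3 : ¬ median < hd.2 := by omega
      simp [List.foldl_cons, h1, h2, h3, ih]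
      ring
    · by_cases h2 : hd.2 = median
      · have h3 : ¬ median < hd.2 := by omega
        simp [List.foldl_cons, h2, ih]
        ring
      · have h3 : median < hd.2 := by omega
        simp [List.foldl_cons, h1, h2, h3, ih]
        ring

/-- The tail of the prefix-sum list, as a simple structural recursion. -/
def pvTail (s : Int) : List (Int × Int) → List Int
  | [] => []
  | c :: t => (s + c.1) :: pvTail (s + c.1) t

lemma foldl_prefix_eq (l : List (Int × Int)) : ∀ (acc : List Int) (s : Int),
    acc.getLastD 0 = s →
    l.foldl (fun pre cl => pre ++ [pre.getLastD 0 + cl.1]) acc = acc ++ pvTail s l := by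
  induction l with
  | nil => intro acc s _; simp [pvTail]
  | cons c t ih =>
    intro acc s hs
    simp only [List.foldl_cons, hs, pvTail]
    rw [ih (acc ++ [s + c.1]) (s + c.1) (by simp)]
    simp

lemma prefix_getD (l : List (Int × Int)) : ∀ (s : Int) (k : Nat), k ≤ l.length →
    (s :: pvTail s l).getD k 0 = s + ((l.take k).map Prod.fst).sum := by
  induction l with
  | nil =>
    intro s k hk
    have : k = 0 := by simpa using hk
    subst this; simp
  | cons c t ih =>
    intro s k hk
    cases k with
    | zero => simp
    | succ k =>
      have := ih (s + c.1) k (by simpa using hk)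
      simp only [pvTail, List.getD_cons_succ] at *
      rw [this]
      simp
      ring

lemma prefix_getLastD (l : List (Int × Int)) : ∀ (s d : Int),
    (s :: pvTail s l).getLastD d = s + (l.map Prod.fst).sum := by
  induction l with
  | nil => intro s d; simp [pvTail]
  | cons c t ih =>
    intro s d
    simp only [pvTail]
    rw [List.getLastD_cons, ih (s + c.1) s]
    simp
    ring

/-- On a list sorted by a downward-closed predicate, p holds exactly on the first countP indices. -/
lemma sorted_countP_char (l : List Int) (p : Int → Bool)
    (hmono : ∀ a b : Int, a ≤ b → p b → p a) :
    l.Pairwise (· ≤ ·) →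
    ∀ i (h : i < l.length), (p l[i] = true ↔ i < l.countP p) := by
  induction l with
  | nil => intro _ i hi; simp at hi
  | cons c t ih =>
    intro hp i hi
    rcases List.pairwise_cons.mp hp with ⟨hall, hpt⟩
    cases i with
    | zero =>
      by_cases hc : p c = true
      · simp [hc]
      · have hz : t.countP p = 0 := by
          rw [List.countP_eq_zero]
          intro b hb hpb
          exact hc (hmono c b (hall b hb) hpb)
        simp [hc, hz]
    | succ i =>
      have hit : i < t.length := by simpa using hi
      by_cases hc : p c = true
      · have := ih hpt i hit
        simp [hc, this]
      · have hz : t.countP p = 0 := by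
          rw [List.countP_eq_zero]
          intro b hb hpb
          exact hc (hmono c b (hall b hb) hpb)
        have hnb : ¬ p t[i] = true := by
          have := List.countP_eq_zero.mp hz t[i] (List.getElem_mem hit)
          simpa using this
        simp [hc, hz, hnb]

/-- The binary-search loop returns c when the test holds exactly below index c. -/
lemma bisect_loop_eq (values : List Int) (x : Int) (left : Bool) (c : Nat)
    (hchar : ∀ i (h : i < values.length),
      (((values[i] < x) || (!left && values[i] == x)) = true ↔ i < c)) :
    ∀ lo hi, lo ≤ c → c ≤ hi → hi ≤ values.length → pvBisect values x left lo hi = c := by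
  suffices H : ∀ n lo hi, hi - lo ≤ n → lo ≤ c → c ≤ hi → hi ≤ values.length →
      pvBisectGo values x left n lo hi = c by
    intro lo hi h1 h2 h3
    exact H (hi - lo) lo hi le_rfl h1 h2 h3
  intro n
  induction n with
  | zero =>
    intro lo hi hle h1 h2 h3
    simp only [pvBisectGo]
    omega
  | succ n ih =>
    intro lo hi hle h1 h2 h3
    rw [pvBisectGo]
    by_cases hlt : lo < hi
    · simp only [hlt, if_true]
      have hmlt : (lo + hi) / 2 < hi := by omega
      have hmge : lo ≤ (lo + hi) / 2 := by omega
      have hmlen : (lo + hi) / 2 < values.length := by omega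
      rw [List.getD_eq_getElem values 0 hmlen]
      by_cases hc : ((values[(lo + hi) / 2] < x) || (!left && values[(lo + hi) / 2] == x)) = true
      · rw [if_pos hc]
        have hmc : (lo + hi) / 2 < c := (hchar _ hmlen).mp hc
        exact ih ((lo + hi) / 2 + 1) hi (by omega) (by omega) h2 h3
      · rw [if_neg hc]
        have hmc : c ≤ (lo + hi) / 2 := by
          by_contra hcon
          exact hc ((hchar _ hmlen).mpr (by omega))
        exact ih lo ((lo + hi) / 2) (by omega) h1 hmc (by omega)
    · simp [hlt]
      omega

/-- On a ≤-by-snd sorted list, the elements satisfying a downward-closed predicate are its prefix. -/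
lemma sorted_filter_eq_take (p : Int × Int → Bool)
    (hmono : ∀ a b : Int × Int, a.2 ≤ b.2 → p b → p a) :
    ∀ (l : List (Int × Int)), l.Pairwise (fun a b => a.2 ≤ b.2) →
    l.filter p = l.take (l.countP p) := by
  intro l
  induction l with
  | nil => intro _; simp
  | cons c t ih =>
    intro hp
    rcases List.pairwise_cons.mp hp with ⟨hall, hpt⟩
    by_cases hc : p c = true
    · simp [hc, ih hpt]
    · have hz : t.countP p = 0 := by
        rw [List.countP_eq_zero]
        intro b hb hpb
        exact hc (hmono c b (hall b hb) hpb)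
      have hft : t.filter p = [] := by
        rw [List.filter_eq_nil_iff]
        intro b hb hpb
        exact hc (hmono c b (hall b hb) hpb)
      simp [hc, hz, hft]

/-- Weights with value ≤ m sum to (weights < m) + (weights = m). -/
lemma sum_filter_le_split (l : List (Int × Int)) (m : Int) :
    ((l.filter (fun cl => decide (cl.2 < m) || (cl.2 == m))).map Prod.fst).sum
    = ((l.filter (fun cl => cl.2 < m)).map Prod.fst).sum
      + ((l.filter (fun cl => cl.2 = m)).map Prod.fst).sum := by
  induction l with
  | nil => simp
  | cons c t ih =>
    by_cases h1 : c.2 < m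
    · have h2 : ¬ c.2 = m := by omega
      simp [h1, h2, ih]
      ring
    · by_cases h2 : c.2 = m
      · simp [h2, ih]
        ring
      · simp [h1, h2, ih]

/-- The total weight splits into the three buckets. -/
lemma sum_all_split (l : List (Int × Int)) (m : Int) :
    (l.map Prod.fst).sum
    = ((l.filter (fun cl => cl.2 < m)).map Prod.fst).sum
      + ((l.filter (fun cl => cl.2 = m)).map Prod.fst).sum
      + ((l.filter (fun cl => m < cl.2)).map Prod.fst).sum := by
  induction l with
  | nil => simp
  | cons c t ih =>
    by_cases h1 : c.2 < m
    · have h2 : ¬ c.2 = m := by omega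
      have h3 : ¬ m < c.2 := by omega
      simp [h1, h2, h3, ih]
      ring
    · by_cases h2 : c.2 = m
      · have h3 : ¬ m < c.2 := by omega
        simp [h2, ih]
        ring
      · have h3 : m < c.2 := by omega
        simp [h1, h2, h3, ih]
        ring

-- ===== VERDICT =====
theorem formation_size_spec : Claim_equal_formation_size := by
  intro classes median _
  simp only [Spec_formation_size, formation_size, formation_size_alt]
  rw [fold_eq_sums]
  simp only [zero_add]
  have hperm := PySem.List.sorted_perm classes (fun cl => cl.2) false
  have hpair := PySem.List.sorted_pairwise classes (fun cl => cl.2)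
  have hvpair := PySem.List.sorted_map_key_pairwise classes (fun cl => cl.2)
  set svals := PySem.List.sorted classes (fun cl => cl.2) false with hsv
  set vs := svals.map (fun cl => cl.2) with hvs
  have hvslen : vs.length = svals.length := by simp [hvs]
  -- the two binary searches return the two counts
  have hb1 : pvBisect vs median true 0 vs.length = vs.countP (fun v => decide (v < median)) := by
    apply bisect_loop_eq
    · intro i h
      have := sorted_countP_char vs (fun v => decide (v < median))
        (fun a b hab hb => by simp at hb ⊢; omega) hvpair i h
      simpa using this
    · exact Nat.zero_le _
    · exact List.countP_le_length
    · exact le_rfl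
  have hb2 : pvBisect vs median false 0 vs.length
      = vs.countP (fun v => decide (v < median) || (v == median)) := by
    apply bisect_loop_eq
    · intro i h
      have := sorted_countP_char vs (fun v => decide (v < median) || (v == median))
        (fun a b hab hb => by simp at hb ⊢; omega) hvpair i h
      simpa using this
    · exact Nat.zero_le _
    · exact List.countP_le_length
    · exact le_rfl
  -- counts on the value list are counts on the sorted pair list
  have hc1 : vs.countP (fun v => decide (v < median))
      = svals.countP (fun cl => decide (cl.2 < median)) := by
    rw [hvs, List.countP_map]; rfl
  have hc2 : vs.countP (fun v => decide (v < median) || (v == median))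
      = svals.countP (fun cl => decide (cl.2 < median) || (cl.2 == median)) := by
    rw [hvs, List.countP_map]; rfl
  -- the prefix list
  have hfold : svals.foldl (fun pre cl => pre ++ [pre.getLastD 0 + cl.1]) [(0 : Int)]
      = (0 : Int) :: pvTail 0 svals := by
    simpa using foldl_prefix_eq svals [(0 : Int)] 0 (by simp)
  rw [hfold, hb1, hb2, hc1, hc2]
  rw [prefix_getD svals 0 _ (List.countP_le_length),
      prefix_getD svals 0 _ (List.countP_le_length),
      prefix_getLastD svals 0]
  simp only [zero_add]
  -- prefix sums at the split points are the filtered sums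
  rw [← sorted_filter_eq_take (fun cl => decide (cl.2 < median))
        (fun a b hab hb => by simp at hb ⊢; omega) svals hpair,
      ← sorted_filter_eq_take (fun cl => decide (cl.2 < median) || (cl.2 == median))
        (fun a b hab hb => by simp at hb ⊢; omega) svals hpair]
  -- transport the sums from svals back to classes
  rw [((hperm.filter _).map Prod.fst).sum_eq,
      ((hperm.filter _).map Prod.fst).sum_eq,
      (hperm.map Prod.fst).sum_eq]
  rw [sum_filter_le_split classes median, sum_all_split classes median]
  set L := ((classes.filter (fun cl => cl.2 < median)).map Prod.fst).sum
  set M := ((classes.filter (fun cl => cl.2 = median)).map Prod.fst).sum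
  set R := ((classes.filter (fun cl => median < cl.2)).map Prod.fst).sum
  simp only [gt_iff_lt]
  split_ifs with h1 h2 h3 <;> simp [min_def] <;> omega
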